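-- pv_equiv track=rewrite | github.com/Woutah/pyside6-utils | pyside6_utils/widgets/console_widget.py | _get_index_nth_occurence
-- ===== SOURCE A (Python) =====
-- def _get_index_nth_occurence(string : str, char : str, occurence : int) -> int:
-- 	counter = 0
-- 	if occurence <= 0:
-- 		return 0
-- 	for i, char in enumerate(string):
-- 		if char == "\n":
-- 			counter += 1
-- 		if counter >= occurence:
-- 			# self._prev_textedit_index = i
-- 			return i
--
-- 	return -1
-- ===== SOURCE B (Python) =====
-- def _get_index_nth_occurence(string : str, char : str, occurence : int) -> int:
-- 	if occurence <= 0: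
-- 		return 0
-- 	parts = string.split("\n")
-- 	if occurence >= len(parts):
-- 		return -1
-- 	return sum(map(len, parts[:occurence])) + occurence - 1
-- ===== Notes on version B (the rewrite author's own statement) =====
-- stated objective: faster
-- what changed: Replaces A's per-character counter scan with splitting the string on newline once and computing the nth newline index arithmetically as the total length of the first n fragments plus n-1 separators, keeping the 0-on-nonpositive and -1-on-missing behaviour.
import Mathlib
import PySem

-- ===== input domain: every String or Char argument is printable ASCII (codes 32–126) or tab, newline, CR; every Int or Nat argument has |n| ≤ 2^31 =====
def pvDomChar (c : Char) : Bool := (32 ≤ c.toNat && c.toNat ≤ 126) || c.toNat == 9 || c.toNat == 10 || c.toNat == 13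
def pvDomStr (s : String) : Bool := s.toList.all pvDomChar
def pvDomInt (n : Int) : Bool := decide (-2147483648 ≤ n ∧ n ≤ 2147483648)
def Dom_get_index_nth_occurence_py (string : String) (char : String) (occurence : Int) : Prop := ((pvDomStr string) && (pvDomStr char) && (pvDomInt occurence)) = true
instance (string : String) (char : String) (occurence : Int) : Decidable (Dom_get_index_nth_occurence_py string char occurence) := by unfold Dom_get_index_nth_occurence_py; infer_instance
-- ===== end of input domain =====

-- B splits the string on newline once and computes the nth newline index arithmetically
-- (lengths of the first n fragments plus n-1 separators) instead of A's counter scan.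

-- ===== PORT A =====
-- the 'for i, char in enumerate(string)' loop of A, carrying the index and the counter
def pvGoA (occurence : Int) : List Char → Nat → Int → Int
  | [], _, _ => -1
  | c :: rest, i, counter =>
      let counter' := if c = '\n' then counter + 1 else counter
      if occurence ≤ counter' then (i : Int) else pvGoA occurence rest (i + 1) counter'

def get_index_nth_occurence_py (string : String) (char : String) (occurence : Int) : Int :=
  if occurence ≤ 0 then 0 else pvGoA occurence string.toList 0 0

-- ===== PORT B =====
-- hand port of Python's string.split("\n"), exact for a one-character separator:
-- splitting the empty string gives [""], a leading '\n' prepends an empty fragment.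
def pvSplitNl : List Char → List (List Char)
  | [] => [[]]
  | c :: rest =>
      let ps := pvSplitNl rest
      if c = '\n' then [] :: ps
      else (c :: ps.headD []) :: ps.tail

def get_index_nth_occurence_py_alt (string : String) (char : String) (occurence : Int) : Int :=
  if occurence ≤ 0 then 0
  else
    let parts := pvSplitNl string.toList
    if (parts.length : Int) ≤ occurence then -1
    else (((parts.take occurence.toNat).map List.length).sum : Int) + occurence - 1

-- ===== PRECONDITION & SPEC =====
def Spec_get_index_nth_occurence_py (string : String) (char : String) (occurence : Int) (out : Int) : Prop := out = get_index_nth_occurence_py_alt string char occurence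
instance (string : String) (char : String) (occurence : Int) (out : Int) : Decidable (Spec_get_index_nth_occurence_py string char occurence out) := by unfold Spec_get_index_nth_occurence_py; infer_instance

-- ===== CLAIM =====
def Claim_equal_get_index_nth_occurence_py : Prop := ∀ (string : String) (char : String) (occurence : Int), Dom_get_index_nth_occurence_py string char occurence → Spec_get_index_nth_occurence_py string char occurence (get_index_nth_occurence_py string char occurence)

-- ===== LEMMAS AND PROOFS =====
lemma pvSplitNl_ne_nil (l : List Char) : pvSplitNl l ≠ [] := by
  cases l with
  | nil => simp [pvSplitNl]
  | cons c rest => by_cases h : c = '\n' <;> simp [pvSplitNl, h]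

lemma pvGoA_eq_split (occ : Int) (l : List Char) :
    ∀ (i : Nat) (counter : Int), counter < occ →
      pvGoA occ l i counter =
        if ((pvSplitNl l).length : Int) ≤ occ - counter then -1
        else (i : Int) + ((((pvSplitNl l).take (occ - counter).toNat).map List.length).sum : Int)
               + (occ - counter) - 1 := by
  induction l with
  | nil =>
      intro i counter h
      simp [pvGoA, pvSplitNl]
      omega
  | cons c rest ih =>
      intro i counter h
      by_cases hc : c = '\n'
      case pos =>
        subst hc
        simp only [pvGoA, pvSplitNl, if_true]
        by_cases h2 : occ ≤ counter + 1
        case pos =>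
          have hocc : occ - counter = 1 := by omega
          have hne := pvSplitNl_ne_nil rest
          have hlen : 1 ≤ (pvSplitNl rest).length := List.length_pos_iff.mpr hne
          rw [if_pos h2,
            if_neg (show ¬ ((([] :: pvSplitNl rest).length : Int) ≤ occ - counter) by
              simp only [List.length_cons]; push_cast; omega),
            hocc]
          norm_num
        case neg =>
          rw [if_neg h2, ih (i + 1) (counter + 1) (by omega)]
          have hk : (occ - counter).toNat = (occ - (counter + 1)).toNat + 1 := by omega
          rw [hk]
          simp only [List.take_succ_cons, List.map_cons, List.length_nil, List.sum_cons,
            List.length_cons]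
          split_ifs with ha hb hb
          · rfl
          · exact absurd hb (by push_cast at ha ⊢; omega)
          · exact absurd ha (by push_cast at hb ⊢; omega)
          · push_cast; omega
      case neg =>
        cases hs : pvSplitNl rest with
        | nil => exact absurd hs (pvSplitNl_ne_nil rest)
        | cons p ps =>
          simp only [pvGoA, pvSplitNl, if_neg hc, hs, List.headD_cons, List.tail_cons]
          rw [if_neg (show ¬ occ ≤ counter by omega)]
          rw [ih (i + 1) counter h, hs]
          obtain ⟨j, hj⟩ : ∃ j, (occ - counter).toNat = j + 1 :=
            ⟨(occ - counter).toNat - 1, by omega⟩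
          rw [hj]
          simp only [List.take_succ_cons, List.map_cons, List.sum_cons, List.length_cons]
          split_ifs with ha
          · rfl
          · push_cast; omega

-- ===== VERDICT =====
theorem get_index_nth_occurence_py_spec : Claim_equal_get_index_nth_occurence_py := by
  intro string char occurence _
  unfold Spec_get_index_nth_occurence_py get_index_nth_occurence_py get_index_nth_occurence_py_alt
  by_cases h : occurence ≤ 0
  · simp [h]
  · have hlt : (0 : Int) < occurence := by omega
    simp only [if_neg h]
    rw [pvGoA_eq_split occurence string.toList 0 0 hlt]
    norm_num
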